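-- pv_equiv track=rewrite | github.com/Hi-Im-Simon/Advent-of-Code | 2016/day-11.py | part1_2
-- ===== SOURCE A (Python) =====
-- def prep_input(f):  # edit to adjust how the program reads your files
--     data = [x.strip().split().count('a') for x in f]
--     return data
--
-- def part1_2(f, part):
--     items = prep_input(f)
--     if part == 2:
--         items[0] += 4
--
--     moves = 0
--     for i in range(len(items) - 1):
--         while items[i] != 0:
--             moves += 1
--             items[i] -= 2
--             items[i + 1] += 2
--             if items[i] > 0:
--                 moves += 1
--                 items[i] += 1
--                 items[i + 1] -= 1
--     return moves
-- ===== SOURCE B (Python) =====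
-- def part1_2(f, part):
--     # Closed form: moving s items one floor up costs 2*s - 3 moves (s >= 2), 0 if s == 0.
--     # One pass over the floors accumulating the prefix sum; no move-by-move simulation.
--     n = len(f)
--     total = 0
--     moves = 0
--     for idx, x in enumerate(f):
--         c = x.strip().split().count('a')
--         if idx == 0 and part == 2:
--             c += 4
--         total += c
--         if idx < n - 1 and total >= 2:
--             moves += 2 * total - 3
--     return moves
-- ===== Notes on version B (the rewrite author's own statement) =====
-- stated objective: alternative
-- what changed: Replaces the move-by-move elevator simulation (inner while loop decrementing item counts) by the closed form 2*s-3 per floor applied to a running prefix sum in a single pass.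
-- outside the precondition, e.g. on part1_2(['a', 'a'], 1): A does not finish within the time limit, B returns 0; on part1_2([], 2): A raises IndexError, B returns 0
import Mathlib
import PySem

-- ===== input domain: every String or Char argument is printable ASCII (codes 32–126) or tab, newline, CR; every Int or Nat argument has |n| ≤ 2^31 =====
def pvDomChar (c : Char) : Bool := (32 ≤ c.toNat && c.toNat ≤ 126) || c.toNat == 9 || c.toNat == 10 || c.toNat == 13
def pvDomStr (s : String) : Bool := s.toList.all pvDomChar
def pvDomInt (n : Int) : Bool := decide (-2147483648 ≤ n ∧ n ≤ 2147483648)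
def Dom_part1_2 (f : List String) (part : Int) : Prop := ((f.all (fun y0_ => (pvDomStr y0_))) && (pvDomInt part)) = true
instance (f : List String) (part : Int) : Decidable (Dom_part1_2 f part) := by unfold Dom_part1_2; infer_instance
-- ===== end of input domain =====

-- B replaces A's move-by-move elevator simulation by the per-floor closed form 2·s−3
-- applied to a running prefix sum of the item counts, in one pass over the floors.

-- ===== PORT A =====
-- x.strip().split().count('a'), shared token counter
def cntA (x : String) : Int := ((PySem.Str.split₀ (PySem.Str.strip x)).count "a" : Int)

def prepInput (f : List String) : List Int := f.map cntA

-- the inner 'while items[i] != 0' loop; fuel only makes the recursion total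
-- (ci.toNat + 1 fuel suffices on every input Pre_ admits)
def loopA : Nat → Int → Int → Int → Int × Int × Int
  | 0, ci, cj, moves => (ci, cj, moves)
  | fuel+1, ci, cj, moves =>
      if ci ≠ 0 then
        let moves := moves + 1
        let ci := ci - 2
        let cj := cj + 2
        if ci > 0 then loopA fuel (ci + 1) (cj - 1) (moves + 1)
        else loopA fuel ci cj moves
      else (ci, cj, moves)

def stepA (st : List Int × Int) (i : Nat) : List Int × Int :=
  let ci := st.1.getD i 0
  let cj := st.1.getD (i + 1) 0
  let r := loopA (ci.toNat + 1) ci cj st.2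
  ((st.1.set i r.1).set (i + 1) r.2.1, r.2.2)

def part1_2 (f : List String) (part : Int) : Int :=
  let items := prepInput f
  let items := if part = 2 then items.set 0 (items.getD 0 0 + 4) else items
  (List.foldl stepA (items, 0) (List.range (items.length - 1))).2

-- ===== PORT B =====
def stepB (n : Nat) (part : Int) (st : Int × Int) (p : Int × String) : Int × Int :=
  let c := ((PySem.Str.split₀ (PySem.Str.strip p.2)).count "a" : Int)
  let c := if p.1 = 0 ∧ part = 2 then c + 4 else c
  let total := st.1 + c
  if p.1 < (n : Int) - 1 ∧ total ≥ 2 then (total, st.2 + (2 * total - 3)) else (total, st.2)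

def part1_2_alt (f : List String) (part : Int) : Int :=
  (List.foldl (stepB f.length part) (0, 0) (PySem.List.enumerate f)).2

-- ===== PRECONDITION & SPEC =====
-- the per-floor item counts after the part-2 adjustment (used only to state Pre_)
def adjItems (f : List String) (part : Int) : List Int :=
  if part = 2 then
    match f with
    | [] => []
    | x :: xs => (cntA x + 4) :: xs.map cntA
  else f.map cntA

-- Pre_ excludes ([], part=2), where A raises IndexError, and inputs where some proper-prefix
-- item-sum equals 1, on which A's while loop never terminates (Python A diverges).
def Pre_part1_2 (f : List String) (part : Int) : Prop :=
  (part = 2 → f ≠ []) ∧ ∀ i < f.length - 1, ((adjItems f part).take (i + 1)).sum ≠ 1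
instance (f : List String) (part : Int) : Decidable (Pre_part1_2 f part) := by
  unfold Pre_part1_2; infer_instance

def pvWitness_part1_2 : List String × Int := (["a a", "b", "a a a"], 1)

def Spec_part1_2 (f : List String) (part : Int) (out : Int) : Prop := out = part1_2_alt f part
instance (f : List String) (part : Int) (out : Int) : Decidable (Spec_part1_2 f part out) := by unfold Spec_part1_2; infer_instance

-- ===== CLAIM (what is proved, stated in full; the proofs are below) =====
def Claim_equal_part1_2 : Prop := ∀ (f : List String) (part : Int), Dom_part1_2 f part → Pre_part1_2 f part → Spec_part1_2 f part (part1_2 f part)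

-- ===== LEMMAS AND PROOFS =====
-- A's per-floor cost and per-floor cost sum over successive prefix sums
def costF (s : Int) : Int := if s = 0 then 0 else 2 * s - 3
def sumA (s : Int) (cs : List Int) : Int :=
  match cs with
  | [] => 0
  | c :: cs' => costF s + sumA (s + c) cs'

-- B's per-floor cost and cost sum (last floor's total never contributes)
def costB (s : Int) : Int := if s ≥ 2 then 2 * s - 3 else 0
def sumB (s : Int) (cs : List Int) : Int :=
  match cs with
  | [] => 0
  | c :: cs' => (if cs' = [] then 0 else costB (s + c)) + sumB (s + c) cs'

lemma loop_spec (k : Nat) : ∀ cj m : Int, k ≠ 1 →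
    loopA (k + 1) (k : Int) cj m = (0, cj + (k : Int), m + costF (k : Int)) := by
  induction k with
  | zero => intro cj m _; simp [loopA, costF]
  | succ k ih =>
    intro cj m hk
    match k, ih with
    | 0, _ => exact absurd rfl hk
    | 1, _ =>
      show loopA 3 (2 : Int) cj m = _
      norm_num [loopA, costF]
    | Nat.succ (Nat.succ k), ih =>
      have h1 : ((k + 2 + 1 : Nat) : Int) ≠ 0 := by push_cast; omega
      have h2 : ((k + 2 + 1 : Nat) : Int) - 2 > 0 := by push_cast; omega
      have step : loopA (k + 2 + 1 + 1) ((k + 2 + 1 : Nat) : Int) cj m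
          = loopA (k + 2 + 1) (((k + 2 + 1 : Nat) : Int) - 2 + 1) (cj + 2 - 1) (m + 1 + 1) := by
        simp only [loopA, if_pos h1, if_pos h2]
      have hc : (((k + 2 + 1 : Nat) : Int) - 2 + 1) = ((k + 2 : Nat) : Int) := by push_cast; ring
      rw [step, hc, ih (cj + 2 - 1) (m + 1 + 1) (by omega)]
      have hne : ((k + 2 : Nat) : Int) ≠ 0 := by push_cast; omega
      have hne' : ((k + 2 + 1 : Nat) : Int) ≠ 0 := by push_cast; omega
      simp only [costF, if_neg hne, if_neg hne']
      refine Prod.ext rfl (Prod.ext ?_ ?_) <;> · simp; omega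

lemma foldA_spec (cs : List Int) : ∀ (pre : List Int) (s m : Int), 0 ≤ s →
    (∀ c ∈ cs, 0 ≤ c) → (∀ j < cs.length, s + ((cs.take j).sum) ≠ 1) →
    List.foldl stepA (pre ++ s :: cs, m) (List.range' pre.length cs.length)
      = (pre ++ List.replicate cs.length 0 ++ [s + cs.sum], m + sumA s cs) := by
  induction cs with
  | nil => intro pre s m _ _ _; simp [sumA]
  | cons c cs' ih =>
    intro pre s m hs hnn hpre
    have hs1 : s ≠ 1 := by simpa using hpre 0 (by simp)
    have hcast : ((s.toNat : Nat) : Int) = s := Int.toNat_of_nonneg hs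
    have hk1 : s.toNat ≠ 1 := by omega
    simp only [List.length_cons, List.range'_succ, List.foldl_cons]
    have hstep : stepA (pre ++ s :: c :: cs', m) pre.length
        = (pre ++ (0 : Int) :: (s + c) :: cs', m + costF s) := by
      have hget1 : (pre ++ s :: c :: cs').getD pre.length 0 = s := by simp [List.getD]
      have hget2 : (pre ++ s :: c :: cs').getD (pre.length + 1) 0 = c := by simp [List.getD]
      have hloop : loopA (s.toNat + 1) s c m = (0, c + s, m + costF s) := by
        have := loop_spec s.toNat c m hk1; rw [hcast] at this; exact this
      simp only [stepA, hget1, hget2]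
      rw [hloop]
      simp only [add_comm c s]
      simp
    rw [hstep]
    have hpre' : pre ++ (0:Int) :: (s + c) :: cs' = (pre ++ [0]) ++ (s + c) :: cs' := by simp
    rw [hpre']
    have hlen : pre.length + 1 = (pre ++ [(0:Int)]).length := by simp
    rw [hlen, ih (pre ++ [0]) (s + c) (m + costF s)
      (by have := hnn c (by simp); omega)
      (fun x hx => hnn x (by simp [hx]))
      (fun j hj => by
        have := hpre (j + 1) (by simpa using hj)
        simpa [add_assoc, add_comm, add_left_comm] using this)]
    have he : s + c + cs'.sum = s + (c :: cs').sum := by simp; ring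
    refine Prod.ext ?_ ?_
    · simp only []
      rw [he]
      simp [List.replicate_succ]
    · simp [sumA]; ring

lemma foldB_spec (n : Nat) (part : Int) (xs : List String) : ∀ (k : Nat) (total m : Int),
    1 ≤ k → k + xs.length = n →
    (List.foldl (stepB n part) (total, m) (PySem.List.enumerate xs (k : Int))).2
      = m + sumB total (xs.map cntA) := by
  induction xs with
  | nil => intro k total m _ _; simp [sumB]
  | cons x xs' ih =>
    intro k total m hk hn
    rw [PySem.List.enumerate_cons, List.foldl_cons]
    have hstep : stepB n part (total, m) ((k : Int), x)
        = if ((k : Int) < (n : Int) - 1 ∧ total + cntA x ≥ 2)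
          then (total + cntA x, m + (2 * (total + cntA x) - 3)) else (total + cntA x, m) := by
      have hk0 : ¬ ((k : Int) = 0 ∧ part = 2) := by
        rintro ⟨h, _⟩; omega
      simp only [stepB, cntA, if_neg hk0]
    have hcast : ((k : Int) + 1) = ((k + 1 : Nat) : Int) := by push_cast; ring
    by_cases hlast : xs' = []
    · subst hlast
      have hcond : ¬ ((k : Int) < (n : Int) - 1 ∧ total + cntA x ≥ 2) := by
        rintro ⟨h, _⟩
        simp at hn
        omega
      rw [hstep, if_neg hcond]
      simp [sumB]
    · have hlt : (k : Int) < (n : Int) - 1 := by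
        have : xs'.length ≥ 1 := by
          cases xs' with | nil => simp at hlast | cons _ _ => simp
        simp at hn
        omega
      have hrec := fun m' => ih (k + 1) (total + cntA x) m' (by omega) (by simp at hn ⊢; omega)
      rw [hstep]
      by_cases hge : total + cntA x ≥ 2
      · rw [if_pos ⟨hlt, hge⟩, hcast, hrec _]
        simp [sumB, hlast, costB, if_pos hge]
        ring
      · rw [if_neg (by rintro ⟨_, h⟩; exact hge h), hcast, hrec _]
        simp [sumB, hlast, costB, if_neg hge]

lemma sumA_eq_sumB (cs : List Int) : ∀ s : Int, 0 ≤ s → (∀ c ∈ cs, 0 ≤ c) →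
    (∀ j < cs.length, s + ((cs.take j).sum) ≠ 1) →
    sumA s cs = (if cs = [] then 0 else costB s) + sumB s cs := by
  induction cs with
  | nil => intro s _ _ _; simp [sumA, sumB]
  | cons c cs' ih =>
    intro s hs hnn hpre
    have hs1 : s ≠ 1 := by simpa using hpre 0 (by simp)
    have hcost : costF s = costB s := by
      unfold costF costB
      rcases lt_trichotomy s 2 with h | h | h
      · have : s = 0 := by omega
        simp [this]
      · simp [h]
      · rw [if_neg (by omega), if_pos (by omega)]
    simp only [sumA, sumB, hcost]
    by_cases hlast : cs' = []
    · simp [hlast, sumA, sumB]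
    · have ih' := ih (s + c) (by have := hnn c (by simp); omega)
        (fun x hx => hnn x (by simp [hx]))
        (fun j hj => by
          have := hpre (j + 1) (by simpa using hj)
          simpa [add_assoc, add_comm, add_left_comm] using this)
      rw [ih', if_neg hlast]
      simp

-- ===== VERDICT (by name: the statement is the Claim_ definition above) =====
lemma cntA_nonneg (x : String) : 0 ≤ cntA x := by unfold cntA; exact Int.natCast_nonneg _

theorem part1_2_spec : Claim_equal_part1_2 := by
  unfold Claim_equal_part1_2
  intro f part _ hpre
  obtain ⟨hne, hps⟩ := hpre
  unfold Spec_part1_2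
  cases f with
  | nil => simp [part1_2, part1_2_alt, prepInput, PySem.List.enumerate]
  | cons x xs =>
    set a : Int := if part = 2 then cntA x + 4 else cntA x with ha
    set cs : List Int := xs.map cntA with hcs
    have ha0 : 0 ≤ a := by
      have := cntA_nonneg x
      by_cases h : part = 2 <;> simp [ha, h] <;> omega
    have hnn : ∀ c ∈ cs, 0 ≤ c := by
      intro c hc
      obtain ⟨y, _, rfl⟩ := List.mem_map.mp hc
      exact cntA_nonneg y
    have hadjform : adjItems (x :: xs) part = a :: cs := by
      by_cases h : part = 2 <;> simp [adjItems, h, ha, hcs]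
    have hps' : ∀ j < cs.length, a + (cs.take j).sum ≠ 1 := by
      intro j hj
      have := hps j (by simpa [hcs] using hj)
      rw [hadjform] at this
      simpa using this
    -- A side
    have hA : part1_2 (x :: xs) part = sumA a cs := by
      unfold part1_2
      have hitems : (if part = 2
          then (prepInput (x :: xs)).set 0 ((prepInput (x :: xs)).getD 0 0 + 4)
          else prepInput (x :: xs)) = a :: cs := by
        by_cases h : part = 2 <;> simp [prepInput, h, ha, hcs]
      simp only [hitems]
      have := foldA_spec cs [] a 0 ha0 hnn hps'
      simp only [List.nil_append, List.length_nil] at this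
      simp [List.range_eq_range', this]
    -- B side
    have hB : part1_2_alt (x :: xs) part
        = (if ((0 : Int) < ((x :: xs).length : Int) - 1 ∧ a ≥ 2) then 2 * a - 3 else 0)
            + sumB a cs := by
      unfold part1_2_alt
      rw [PySem.List.enumerate_cons, List.foldl_cons]
      have hstep0 : stepB (x :: xs).length part (0, 0) ((0 : Int), x)
          = if ((0 : Int) < ((x :: xs).length : Int) - 1 ∧ a ≥ 2)
            then (a, 0 + (2 * a - 3)) else (a, 0) := by
        by_cases h : part = 2 <;>
          simp only [stepB, cntA, h, and_true, and_false, if_true, if_false, zero_add, ha]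
      rw [hstep0]
      have hrec := fun m' => foldB_spec (x :: xs).length part xs 1 a m' (le_refl 1) (by simp; omega)
      by_cases hcond : ((0 : Int) < ((x :: xs).length : Int) - 1 ∧ a ≥ 2)
      · rw [if_pos hcond, if_pos hcond]
        have := hrec (0 + (2 * a - 3))
        simpa [hcs] using this
      · rw [if_neg hcond, if_neg hcond]
        have := hrec 0
        simpa [hcs] using this
    rw [hA, hB, sumA_eq_sumB cs a ha0 hnn hps']
    congr 1
    by_cases hxs : xs = []
    · subst hxs
      simp [hcs]
    · have h1 : cs ≠ [] := by simpa [hcs] using hxs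
      have hx1 : 0 < xs.length := List.length_pos_iff.mpr hxs
      have hlen : (0 : Int) < ((x :: xs).length : Int) - 1 := by
        simp only [List.length_cons]; push_cast; omega
      rw [if_neg h1]
      simp only [costB]
      by_cases hge : a ≥ 2
      · rw [if_pos hge, if_pos (And.intro hlen hge)]
      · rw [if_neg hge, if_neg (fun h => hge h.2)]
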